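-- pv_equiv track=rewrite | github.com/Shiinzy8/Allover | Udemy/best_python/functions/home_work.py | any_duplicates
-- ===== SOURCE A (Python) =====
-- def any_duplicates(square):
--     # ваше решение
--     numbers_set = set()
--     for l in square:
--         for number in l:
--             numbers_set.add(number)
--
--     if len(numbers_set) == 9:
--         return False
--     return True
-- ===== SOURCE B (Python) =====
-- def any_duplicates(square):
--     # sort-then-scan: flatten, sort, count distinct values in one pass
--     flat = sorted(n for row in square for n in row)
--     distinct = 0
--     prev = None
--     for x in flat:
--         if distinct == 0 or x != prev:
--             distinct += 1
--         prev = x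
--     return distinct != 9
-- ===== Notes on version B (the rewrite author's own statement) =====
-- stated objective: alternative
-- what changed: Replaces the nested set-building loops with flatten + sort + a single scan counting distinct values by comparing each element to its predecessor, still testing the distinct count against the literal 9.
import Mathlib
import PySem

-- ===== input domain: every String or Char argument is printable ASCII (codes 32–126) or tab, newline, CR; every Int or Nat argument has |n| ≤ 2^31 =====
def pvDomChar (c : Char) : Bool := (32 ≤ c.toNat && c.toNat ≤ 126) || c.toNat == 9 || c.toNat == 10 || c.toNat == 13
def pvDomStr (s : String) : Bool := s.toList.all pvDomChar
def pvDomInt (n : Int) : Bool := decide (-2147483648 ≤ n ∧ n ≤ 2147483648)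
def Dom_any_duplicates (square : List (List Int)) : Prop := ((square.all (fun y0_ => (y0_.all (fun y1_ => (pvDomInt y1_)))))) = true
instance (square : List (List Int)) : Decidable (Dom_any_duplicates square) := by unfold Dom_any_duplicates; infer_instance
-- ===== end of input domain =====

-- B replaces A's nested set-building loops by flatten + sort + one scan counting
-- distinct values (comparing each element to its predecessor), still comparing to 9.

-- ===== PORT A =====
-- numbers_set = set(); for l in square: for number in l: numbers_set.add(number)
def any_duplicates (square : List (List Int)) : Bool :=
  let numbers_set :=
    square.foldl (fun st l => l.foldl (fun st2 number => PySem.Set.add st2 number) st)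
      PySem.Set.empty
  if PySem.Set.len numbers_set == 9 then false else true

-- ===== PORT B =====
-- the scan loop: prev carried along, +1 whenever the element differs from its predecessor
def pvScanRest (prev : Int) : List Int → Int
  | [] => 0
  | x :: t => (if x ≠ prev then 1 else 0) + pvScanRest x t

def pvScanDistinct : List Int → Int
  | [] => 0
  | x :: t => 1 + pvScanRest x t

def any_duplicates_alt (square : List (List Int)) : Bool :=
  let flat := square.flatMap (fun row => row)
  let s := PySem.List.sorted flat (fun x => x) false
  decide (pvScanDistinct s ≠ 9)

-- ===== PRECONDITION & SPEC =====
def Spec_any_duplicates (square : List (List Int)) (out : Bool) : Prop := out = any_duplicates_alt square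
instance (square : List (List Int)) (out : Bool) : Decidable (Spec_any_duplicates square out) := by unfold Spec_any_duplicates; infer_instance

-- ===== CLAIM (what is proved, stated in full; the proofs are below) =====
def Claim_equal_any_duplicates : Prop := ∀ (square : List (List Int)), Dom_any_duplicates square → Spec_any_duplicates square (any_duplicates square)

-- ===== LEMMAS AND PROOFS =====

-- A's nested folds build exactly set(flatten(square))
theorem pv_fold_flatten (sq : List (List Int)) (s : PySem.Set Int) :
    sq.foldl (fun st l => l.foldl (fun st2 n => PySem.Set.add st2 n) st) s
      = (sq.flatMap (fun r => r)).foldl (fun st2 n => PySem.Set.add st2 n) s := by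
  induction sq generalizing s with
  | nil => rfl
  | cons h t ih => simp [List.foldl_append, ih]

-- set size = number of distinct elements
theorem pv_ofList_length (xs : List Int) :
    (PySem.Set.ofList xs).length = xs.toFinset.card := by
  rw [← PySem.List.dedup_eq_ofList]
  have hn : (PySem.List.dedup xs).Nodup := PySem.List.nodup_dedup xs
  have : (PySem.List.dedup xs).toFinset = xs.toFinset := by
    ext a; simp
  rw [← List.toFinset_card_of_nodup hn, this]

-- the scan over a sorted tail counts the distinct elements (minus the head)
theorem pv_scanRest (l : List Int) : ∀ (prev : Int),
    (prev :: l).Pairwise (· ≤ ·) →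
    pvScanRest prev l = ((prev :: l).toFinset.card : Int) - 1 := by
  induction l with
  | nil => intro prev _; simp [pvScanRest]
  | cons y t ih =>
    intro prev hp
    have hpy : prev ≤ y := (List.pairwise_cons.mp hp).1 y (by simp)
    have hprevall : ∀ z ∈ t, prev ≤ z := fun z hz =>
      (List.pairwise_cons.mp hp).1 z (by simp [hz])
    have hyt : (y :: t).Pairwise (· ≤ ·) := (List.pairwise_cons.mp hp).2
    have iht := ih y hyt
    by_cases hxy : y = prev
    · subst hxy
      simp [pvScanRest, iht, List.toFinset_cons]
    · have hlt : prev < y := lt_of_le_of_ne hpy (fun h => hxy h.symm)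
      have hnot : prev ∉ (y :: t).toFinset := by
        simp only [List.mem_toFinset, List.mem_cons]
        rintro (rfl | hz)
        · exact absurd rfl (ne_of_lt hlt)
        · exact absurd ((List.pairwise_cons.mp hyt).1 prev hz)
            (not_le_of_gt hlt)
      have hcard : ((prev :: y :: t).toFinset.card : Int)
          = ((y :: t).toFinset.card : Int) + 1 := by
        rw [List.toFinset_cons, Finset.card_insert_of_notMem hnot]
        push_cast; ring
      have hcpos : 1 ≤ ((y :: t).toFinset.card : Int) := by
        have : y ∈ (y :: t).toFinset := by simp
        have := Finset.card_pos.mpr ⟨y, this⟩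
        exact_mod_cast this
      simp only [pvScanRest, if_pos (fun h => hxy h), iht, hcard]
      omega

-- the whole scan over a sorted list counts the distinct elements
theorem pv_scanDistinct (l : List Int) (h : l.Pairwise (· ≤ ·)) :
    pvScanDistinct l = (l.toFinset.card : Int) := by
  cases l with
  | nil => simp [pvScanDistinct]
  | cons x t =>
    have := pv_scanRest t x h
    have hcpos : 1 ≤ ((x :: t).toFinset.card : Int) := by
      have hm : x ∈ (x :: t).toFinset := by simp
      exact_mod_cast Finset.card_pos.mpr ⟨x, hm⟩
    simp only [pvScanDistinct, this]
    omega

-- ===== VERDICT (by name: the statement is the Claim_ definition above) =====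
theorem any_duplicates_spec : Claim_equal_any_duplicates := by
  intro square _
  unfold Spec_any_duplicates any_duplicates any_duplicates_alt
  set flat := square.flatMap (fun row => row) with hflat
  -- A's count
  have hA : PySem.Set.len
      (square.foldl (fun st l => l.foldl (fun st2 n => PySem.Set.add st2 n) st)
        PySem.Set.empty) = (flat.toFinset.card : Int) := by
    rw [pv_fold_flatten]
    have : (flat.foldl (fun st2 n => PySem.Set.add st2 n) PySem.Set.empty)
        = PySem.Set.ofList flat := (PySem.Set.ofList_eq_foldl flat).symm
    rw [this]
    simp [PySem.Set.len, pv_ofList_length]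
  -- B's count
  have hsort : (PySem.List.sorted flat (fun x => x) false).Pairwise (· ≤ ·) :=
    PySem.List.sorted_pairwise flat (fun x => x)
  have hperm : (PySem.List.sorted flat (fun x => x) false).toFinset = flat.toFinset :=
    List.toFinset_eq_of_perm _ _ (PySem.List.sorted_perm flat (fun x => x) false)
  have hB : pvScanDistinct (PySem.List.sorted flat (fun x => x) false)
      = (flat.toFinset.card : Int) := by
    rw [pv_scanDistinct _ hsort, hperm]
  simp only [hA, hB]
  by_cases h9 : (flat.toFinset.card : Int) = 9 <;> simp [h9]
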